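-- pv_equiv track=rewrite | github.com/rm-3284/Latent-Mechanism-Multilingual | src/ablation_amplification_intervention.py | combine_except_one
-- ===== SOURCE A (Python) =====
-- def combine_except_one(intervention: dict[str, list[tuple]], exclude:str):
--     already_seen = set()
--     duplicates = set()
--     for key, val in intervention.items():
--         if key == exclude:
--             continue
--         for layer, _, feature_idx, _ in val:
--             item = (layer, feature_idx)
--             if item in already_seen:
--                 duplicates.add(item)
--             else:
--                 already_seen.add(item)
--     interventions = list()
--     for key, vals in intervention.items():
--         if key == exclude:
--             continue
--         for layer, pos, feature_idx, val in vals: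
--             item = (layer, feature_idx)
--             if item not in duplicates:
--                 interventions.append((layer, pos, feature_idx, val))
--     return interventions
-- ===== SOURCE B (Python) =====
-- def combine_except_one(intervention: dict[str, list[tuple]], exclude: str):
--     # Group-by instead of two filtering passes: bucket every non-excluded tuple
--     # under its (layer, feature_idx) key, then emit the singleton buckets.
--     # Correct, incl. order: dicts keep first-insertion key order, and the kept
--     # keys each hold exactly one tuple, so bucket order == original tuple order.
--     groups = {}
--     for key, vals in intervention.items():
--         if key == exclude:
--             continue
--         for layer, pos, feature_idx, val in vals:
--             groups.setdefault((layer, feature_idx), []).append((layer, pos, feature_idx, val))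
--     return [t for g in groups.values() if len(g) == 1 for t in g]
-- ===== Notes on version B (the rewrite author's own statement) =====
-- stated objective: alternative
-- what changed: Replaces A's two filtering passes (build seen/duplicates sets, then re-scan the whole input testing membership) by a single group-by pass that buckets every non-excluded tuple under its (layer, feature_idx) key in an insertion-ordered dict, then emits the singleton buckets in dict order; the second scan of the input disappears and order is preserved because each kept key holds exactly one tuple, so bucket order equals original tuple order.
import Mathlib
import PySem

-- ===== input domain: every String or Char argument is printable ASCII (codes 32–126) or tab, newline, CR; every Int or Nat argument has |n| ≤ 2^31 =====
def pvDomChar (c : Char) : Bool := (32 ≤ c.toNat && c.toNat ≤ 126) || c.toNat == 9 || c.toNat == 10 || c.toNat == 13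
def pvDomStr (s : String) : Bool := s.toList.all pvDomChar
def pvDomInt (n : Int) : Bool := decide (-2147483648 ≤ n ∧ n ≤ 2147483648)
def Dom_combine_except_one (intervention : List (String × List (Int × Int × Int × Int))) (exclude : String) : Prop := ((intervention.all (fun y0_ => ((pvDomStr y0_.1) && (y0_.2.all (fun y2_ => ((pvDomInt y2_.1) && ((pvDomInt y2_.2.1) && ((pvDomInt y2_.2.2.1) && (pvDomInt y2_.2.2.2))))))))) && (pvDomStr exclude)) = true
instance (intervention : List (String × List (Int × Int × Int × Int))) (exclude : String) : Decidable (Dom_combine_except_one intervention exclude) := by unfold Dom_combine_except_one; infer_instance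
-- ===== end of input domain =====

-- B replaces A's two filtering passes (seen/duplicates sets, then a re-scan of the input) by one
-- group-by pass into ordered buckets keyed by (layer, feature_idx), emitting the singleton buckets
-- (objective: alternative).

-- ===== PORT A =====
def combine_except_one (intervention : List (String × List (Int × Int × Int × Int))) (exclude : String) : List (Int × Int × Int × Int) :=
  let st := intervention.foldl
    (fun (st : PySem.Set (Int × Int) × PySem.Set (Int × Int)) kv =>
      if kv.1 == exclude then st
      else kv.2.foldl
        (fun st t =>
          if PySem.Set.contains st.1 (t.1, t.2.2.1) then (st.1, PySem.Set.add st.2 (t.1, t.2.2.1))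
          else (PySem.Set.add st.1 (t.1, t.2.2.1), st.2)) st)
    (PySem.Set.empty, PySem.Set.empty)
  intervention.foldl
    (fun acc kv =>
      if kv.1 == exclude then acc
      else kv.2.foldl
        (fun acc t =>
          if !(PySem.Set.contains st.2 (t.1, t.2.2.1)) then acc ++ [t] else acc) acc)
    []

-- ===== PORT B =====
-- groups.setdefault((layer, feature_idx), []).append(t) nets d[k] = d.get(k, []) + [t] with the
-- key keeping its first-insertion position: exactly PySem.Dict.modify k [] (· ++ [t]).
def combine_except_one_alt (intervention : List (String × List (Int × Int × Int × Int))) (exclude : String) : List (Int × Int × Int × Int) :=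
  let groups := intervention.foldl
    (fun (d : PySem.Dict (Int × Int) (List (Int × Int × Int × Int))) kv =>
      if kv.1 == exclude then d
      else kv.2.foldl
        (fun d t => d.modify (t.1, t.2.2.1) [] (fun g => g ++ [t])) d)
    PySem.Dict.empty
  ((PySem.Dict.values groups).filter (fun g => g.length == 1)).flatMap (fun g => g)

-- ===== PRECONDITION & SPEC =====
def Spec_combine_except_one (intervention : List (String × List (Int × Int × Int × Int))) (exclude : String) (out : List (Int × Int × Int × Int)) : Prop := out = combine_except_one_alt intervention exclude
instance (intervention : List (String × List (Int × Int × Int × Int))) (exclude : String) (out : List (Int × Int × Int × Int)) : Decidable (Spec_combine_except_one intervention exclude out) := by unfold Spec_combine_except_one; infer_instance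

-- ===== CLAIM (what is proved, stated in full; the proofs are below) =====
def Claim_equal_combine_except_one : Prop := ∀ (intervention : List (String × List (Int × Int × Int × Int))) (exclude : String), Dom_combine_except_one intervention exclude → Spec_combine_except_one intervention exclude (combine_except_one intervention exclude)

-- ===== LEMMAS AND PROOFS =====

-- a skip-one-key outer loop is a fold over the flattened non-excluded tuples
theorem pv_skip_foldl {σ : Type} (f : σ → (Int × Int × Int × Int) → σ) (exclude : String)
    (l : List (String × List (Int × Int × Int × Int))) (init : σ) :
    l.foldl (fun st kv => if kv.1 == exclude then st else kv.2.foldl f st) init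
      = ((l.filter (fun kv => kv.1 != exclude)).flatMap (fun kv => kv.2)).foldl f init := by
  induction l generalizing init with
  | nil => rfl
  | cons kv l ih =>
    simp only [List.foldl_cons, List.filter_cons]
    by_cases h : kv.1 == exclude
    · rw [if_pos h, ih]
      have hb : (kv.1 != exclude) = false := by simp_all [bne]
      simp [hb]
    · rw [if_neg h, ih]
      have hb : (kv.1 != exclude) = true := by simp_all [bne]
      simp [hb, List.foldl_append]

-- invariant of A's first pass: already_seen collects the keys, duplicates the repeated keys
theorem pv_pass1_inv (ks : List (Int × Int)) :
    ∀ (s d : PySem.Set (Int × Int)) (x : Int × Int),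
      (x ∈ (ks.foldl (fun st k => if PySem.Set.contains st.1 k then (st.1, PySem.Set.add st.2 k)
                                   else (PySem.Set.add st.1 k, st.2)) (s, d)).1
        ↔ x ∈ s ∨ x ∈ ks) ∧
      (x ∈ (ks.foldl (fun st k => if PySem.Set.contains st.1 k then (st.1, PySem.Set.add st.2 k)
                                   else (PySem.Set.add st.1 k, st.2)) (s, d)).2
        ↔ x ∈ d ∨ (x ∈ s ∧ x ∈ ks) ∨ 2 ≤ ks.count x) := by
  induction ks with
  | nil => intro s d x; simp
  | cons a ks ih =>
    intro s d x
    simp only [List.foldl_cons]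
    by_cases ha : PySem.Set.contains s a = true
    · have has : a ∈ s := (PySem.Set.contains_iff s a).mp ha
      rw [if_pos ha]
      rcases ih s (PySem.Set.add d a) x with ⟨h1, h2⟩
      constructor
      · rw [h1]
        by_cases hx : x = a <;> simp [hx, has]
      · rw [h2, PySem.Set.mem_add]
        by_cases hx : x = a
        · subst hx
          simp [has, List.mem_cons]
        · have hx' : ¬ a = x := fun h => hx h.symm
          simp [hx, hx', List.mem_cons]
    · have hns : a ∉ s := fun h => ha ((PySem.Set.contains_iff s a).mpr h)
      rw [if_neg ha]
      rcases ih (PySem.Set.add s a) d x with ⟨h1, h2⟩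
      constructor
      · rw [h1, PySem.Set.mem_add]
        by_cases hx : x = a <;> simp [hx]
      · rw [h2, PySem.Set.mem_add]
        by_cases hx : x = a
        · subst hx
          by_cases hk : x ∈ ks
          · have h1c : 1 ≤ ks.count x := List.one_le_count_iff.mpr hk
            simp [hns, hk, List.mem_cons]
          · have h0 : ks.count x = 0 := List.count_eq_zero.mpr hk
            simp [hns, hk, List.mem_cons, h0]
        · have hx' : ¬ a = x := fun h => hx h.symm
          simp [hx, hx', List.mem_cons]

-- A's result over the flat tuple stream T is the filter keeping unique keys
theorem pv_A_filter (T : List (Int × Int × Int × Int)) (dup : PySem.Set (Int × Int))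
    (hdup : ∀ x, x ∈ dup ↔ 2 ≤ (T.map (fun t : Int × Int × Int × Int => (t.1, t.2.2.1))).count x) :
    T.foldl (fun acc t => if !(PySem.Set.contains dup (t.1, t.2.2.1)) then acc ++ [t] else acc) []
      = T.filter (fun t => (T.map (fun t : Int × Int × Int × Int => (t.1, t.2.2.1))).count (t.1, t.2.2.1) == 1) := by
  rw [PySem.List.foldl_append_if_eq_filter]
  rw [List.nil_append]
  apply List.filter_congr
  intro t ht
  have hmem : 1 ≤ (T.map (fun t : Int × Int × Int × Int => (t.1, t.2.2.1))).count (t.1, t.2.2.1) :=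
    List.one_le_count_iff.mpr (List.mem_map_of_mem ht)
  have h := hdup (t.1, t.2.2.1)
  rw [Bool.eq_iff_iff]
  simp only [Bool.not_eq_true', Bool.eq_false_iff, ne_eq, PySem.Set.contains_iff, beq_iff_eq]
  rw [h]
  constructor <;> intro hh <;> omega

-- flatMap over a filtered list as a flatMap with an if
theorem pv_flatMap_filter {α β : Type} (l : List α) (p : α → Bool) (f : α → List β) :
    (l.filter p).flatMap f = l.flatMap (fun x => if p x then f x else []) := by
  induction l with
  | nil => rfl
  | cons x l ih =>
    rw [List.filter_cons, List.flatMap_cons]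
    by_cases h : p x = true
    · simp [h, ih]
    · simp only [Bool.not_eq_true] at h
      simp [h, ih]

theorem pv_foldl_add_len :
    ∀ (n : Nat) (l : List (Int × Int)), l.length ≤ n → ∀ (s : List (Int × Int)),
      l.foldl PySem.Set.add s = s ++ PySem.Set.ofList (l.filter (fun y => y ∉ s)) := by
  intro n
  induction n with
  | zero =>
    intro l hl s
    have : l = [] := List.length_eq_zero_iff.mp (Nat.le_zero.mp hl)
    subst this; simp [PySem.Set.ofList]
  | succ n ih =>
    intro l hl s
    cases l with
    | nil => simp [PySem.Set.ofList]
    | cons x l =>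
      simp only [List.foldl_cons, List.filter_cons]
      have hln : l.length ≤ n := by simpa using hl
      by_cases hx : x ∈ s
      · have hadd : PySem.Set.add s x = s := by simp [PySem.Set.add, hx]
        rw [hadd, ih l hln s]
        simp [hx]
      · have hadd : PySem.Set.add s x = s ++ [x] := by simp [PySem.Set.add, hx]
        rw [hadd, ih l hln (s ++ [x])]
        have hx2 : (decide ¬x ∈ s) = true := by simp [hx]
        simp only [hx2, if_pos]
        have hof : PySem.Set.ofList (x :: l.filter (fun y => y ∉ s))
            = [x] ++ PySem.Set.ofList ((l.filter (fun y => y ∉ s)).filter (fun y => y ∉ ([x] : List (Int × Int)))) := by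
          have : PySem.Set.ofList (x :: l.filter (fun y => y ∉ s))
              = (l.filter (fun y => y ∉ s)).foldl PySem.Set.add [x] := by
            rw [PySem.Set.ofList_eq_foldl]; simp [List.foldl_cons, PySem.Set.add]
          rw [this, ih _ (le_trans (by simpa using List.length_filter_le _ l) hln) [x]]
        rw [hof]
        have hfil : l.filter (fun y => decide ¬ y ∈ s ++ [x])
            = (l.filter (fun y => y ∉ s)).filter (fun y => y ∉ ([x] : List (Int × Int))) := by
          rw [List.filter_filter]
          apply List.filter_congr
          intro y _
          simp [List.mem_append, Bool.and_comm]
        rw [hfil]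
        simp

theorem pv_dedup_cons (x : Int × Int) (l : List (Int × Int)) :
    PySem.List.dedup (x :: l) = x :: PySem.List.dedup (l.filter (fun y => y ≠ x)) := by
  have h1 : PySem.List.dedup (x :: l) = (x :: l).foldl PySem.Set.add [] := by
    simp [PySem.Set.ofList_eq_foldl]
  rw [h1]
  simp only [List.foldl_cons]
  have hadd : PySem.Set.add ([] : List (Int × Int)) x = [x] := by simp [PySem.Set.add]
  rw [hadd, pv_foldl_add_len l.length l (le_refl _) [x]]
  have hfil : l.filter (fun y => y ∉ ([x] : List (Int × Int))) = l.filter (fun y => y ≠ x) := by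
    apply List.filter_congr; intro y _; simp
  rw [hfil]
  simp

-- count of key x in the mapped stream = length of the key-x bucket
theorem pv_count_map_eq_len (k : (Int × Int × Int × Int) → (Int × Int)) (l : List (Int × Int × Int × Int)) (x : Int × Int) :
    (l.map k).count x = (l.filter (fun t => k t == x)).length := by
  rw [List.count_eq_countP, List.countP_map, List.countP_eq_length_filter]
  rfl

theorem pv_groups_flatten (k : (Int × Int × Int × Int) → (Int × Int)) :
    ∀ (n : Nat) (T : List (Int × Int × Int × Int)), T.length ≤ n →
      (PySem.List.dedup (T.map k)).flatMap
          (fun x => if (T.filter (fun t => k t == x)).length == 1 then T.filter (fun t => k t == x) else [])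
        = T.filter (fun t => (T.map k).count (k t) == 1) := by
  intro n
  induction n with
  | zero =>
    intro T hT
    have : T = [] := List.length_eq_zero_iff.mp (Nat.le_zero.mp hT)
    subst this; simp [PySem.List.dedup, PySem.Set.ofList]
  | succ n ih =>
    intro T hT
    cases T with
    | nil => simp [PySem.List.dedup, PySem.Set.ofList]
    | cons t T' =>
      have hTn : T'.length ≤ n := by simpa using hT
      set x0 := k t with hx0
      set R := T'.filter (fun s => k s ≠ x0) with hR
      have hRlen : R.length ≤ n := le_trans (List.length_filter_le _ _) hTn
      have hmap : (T'.map k).filter (fun y => y ≠ x0) = R.map k := by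
        rw [hR, List.filter_map]; rfl
      have hded : PySem.List.dedup ((t :: T').map k) = x0 :: PySem.List.dedup (R.map k) := by
        rw [List.map_cons, pv_dedup_cons, hmap]
      rw [hded, List.flatMap_cons]
      -- the x0 bucket of T is t :: (x0 bucket of T')
      have hbx0 : (t :: T').filter (fun s => k s == x0) = t :: T'.filter (fun s => k s == x0) := by
        rw [List.filter_cons]
        have hx : (k t == x0) = true := by simp [hx0]
        simp [hx]
      -- buckets for keys x ≠ x0 taken in T equal buckets taken in R
      have hbne : ∀ x, x ≠ x0 → (t :: T').filter (fun s => k s == x) = R.filter (fun s => k s == x) := by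
        intro x hx
        rw [List.filter_cons]
        have : (k t == x) = false := by simp [← hx0]; exact fun h => hx h.symm
        rw [this]
        simp only [hR, List.filter_filter]
        apply List.filter_congr
        intro s _
        by_cases hs : k s = x
        · simp [hs, hx]
        · simp [hs]
      -- rewrite the tail flatMap into R's own flatMap and apply the IH
      have htail : (PySem.List.dedup (R.map k)).flatMap
            (fun x => if ((t :: T').filter (fun s => k s == x)).length == 1 then (t :: T').filter (fun s => k s == x) else [])
          = R.filter (fun s => (R.map k).count (k s) == 1) := by
        rw [← ih R hRlen]
        apply List.flatMap_congr
        intro x hx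
        have hxR : x ∈ R.map k := (PySem.List.mem_dedup _ _).mp hx
        have hxne : x ≠ x0 := by
          rcases List.mem_map.mp hxR with ⟨s, hs, rfl⟩
          have := (List.mem_filter.mp hs).2
          simpa using this
        rw [hbne x hxne]
      rw [htail]
      -- lengths of buckets as counts
      have hcnt : ∀ (l : List (Int × Int × Int × Int)) (x : Int × Int), (l.filter (fun s => k s == x)).length = (l.map k).count x :=
        fun l x => (pv_count_map_eq_len k l x).symm
      have hKt : ((t :: T').map k).count x0 = 1 + (T'.map k).count x0 := by
        simp [← hx0]; omega
      -- tail of the RHS filter equals R's unique filter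
      have hrhs : T'.filter (fun s => ((t :: T').map k).count (k s) == 1)
          = R.filter (fun s => (R.map k).count (k s) == 1) := by
        rw [hR, List.filter_filter]
        apply List.filter_congr
        intro s hs
        by_cases hsx : k s = x0
        · have h1 : 1 ≤ (T'.map k).count (k s) := List.one_le_count_iff.mpr (List.mem_map_of_mem hs)
          have hK : ((t :: T').map k).count (k s) = 1 + (T'.map k).count (k s) := by
            simp [hsx, ← hx0]; omega
          rw [hK]
          have : ((1 + (T'.map k).count (k s) == 1)) = false := by
            simp; omega
          simp [hsx]
          rw [hsx] at h1
          omega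
        · have hK : ((t :: T').map k).count (k s) = (T'.map k).count (k s) := by
            simp [List.count_cons, ← hx0]
            intro h; exact absurd h.symm hsx
          have hmap' : (T'.map k).filter (fun y => decide (y ≠ x0)) = (T'.filter (fun s => decide (k s ≠ x0))).map k := by
            rw [List.filter_map]; rfl
          have hRc : ((T'.filter (fun s => decide (k s ≠ x0))).map k).count (k s) = (T'.map k).count (k s) := by
            rw [← hmap']
            exact List.count_filter (by simp [hsx])
          rw [hK, hRc]
          simp [hsx]
      -- assemble
      rw [hbx0]
      have hrhs2 : List.filter (fun s => List.count (k s) (List.map k (t :: T')) == 1) (t :: T')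
          = (if (List.count (k t) (List.map k (t :: T')) == 1) = true then [t] else [])
            ++ List.filter (fun s => List.count (k s) (List.map k (t :: T')) == 1) T' := by
        rw [List.filter_cons]
        split_ifs <;> simp
      rw [hrhs2, hrhs]
      congr 1
      by_cases hc : T'.filter (fun s => k s == x0) = []
      · have h0 : List.count x0 (List.map k T') = 0 := by rw [← hcnt]; simp [hc]
        have hcond : (List.count (k t) (List.map k (t :: T')) == 1) = true := by
          rw [← hx0, hKt, h0]; simp
        have hlen : ((t :: T'.filter (fun s => k s == x0)).length == 1) = true := by simp [hc]
        rw [hcond, hlen]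
        simp [hc]
      · have hpos : 0 < (T'.filter (fun s => k s == x0)).length := List.length_pos_iff.mpr hc
        have hcpos : 1 ≤ List.count x0 (List.map k T') := by rw [← hcnt]; omega
        have hcond : (List.count (k t) (List.map k (t :: T')) == 1) = false := by
          rw [← hx0, hKt]; simp; omega
        have hlen : ((t :: T'.filter (fun s => k s == x0)).length == 1) = false := by simp [hc]
        rw [hcond, hlen]
        simp

theorem combine_proof (intervention : List (String × List (Int × Int × Int × Int))) (exclude : String) :
    combine_except_one intervention exclude = combine_except_one_alt intervention exclude := by
  unfold combine_except_one combine_except_one_alt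
  rw [pv_skip_foldl, pv_skip_foldl, pv_skip_foldl]
  set T := (intervention.filter (fun kv => kv.1 != exclude)).flatMap (fun kv => kv.2) with hT
  set k : (Int × Int × Int × Int) → (Int × Int) := fun t => (t.1, t.2.2.1) with hk
  set K := T.map k with hK
  -- A side: the duplicates set holds exactly the keys occurring at least twice in K
  have hdupK := fun x => (pv_pass1_inv K PySem.Set.empty PySem.Set.empty x).2
  rw [hK, List.foldl_map] at hdupK
  have hdup : ∀ x, x ∈ (T.foldl
      (fun (st : PySem.Set (Int × Int) × PySem.Set (Int × Int)) t =>
        if PySem.Set.contains st.1 (t.1, t.2.2.1) then (st.1, PySem.Set.add st.2 (t.1, t.2.2.1))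
        else (PySem.Set.add st.1 (t.1, t.2.2.1), st.2)) (PySem.Set.empty, PySem.Set.empty)).2
      ↔ 2 ≤ K.count x := by
    intro x
    rw [hdupK x]
    simp [PySem.Set.empty]
    rw [hK]
  rw [pv_A_filter T _ (by rw [hK] at hdup; exact hdup)]
  -- B side: characterise the grouping dict
  have hfold : T.foldl (fun (d : PySem.Dict (Int × Int) (List (Int × Int × Int × Int))) t =>
        d.modify (t.1, t.2.2.1) [] (fun g => g ++ [t])) PySem.Dict.empty
      = (T.map (fun t => (k t, t))).foldl
          (fun d p => d.modify p.1 [] (fun g => g ++ [p.2])) PySem.Dict.empty := by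
    rw [List.foldl_map]
  rw [hfold]
  set G := (T.map (fun t => (k t, t))).foldl
      (fun (d : PySem.Dict (Int × Int) (List (Int × Int × Int × Int))) p =>
        d.modify p.1 [] (fun g => g ++ [p.2])) PySem.Dict.empty with hG
  have hnodup : G.keys.Nodup := by
    rw [hG]
    exact PySem.Dict.nodup_keys_foldl_modify_key _ _ _ _ _ PySem.Dict.nodup_keys_empty
  have hkeys : G.keys = PySem.List.dedup K := by
    rw [hG, PySem.Dict.keys_foldl_modify_key]
    rw [List.map_map]
    rw [hK]
    rfl
  have hgetD : ∀ x, G.getD x [] = T.filter (fun t => k t == x) := by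
    intro x
    rw [hG, PySem.Dict.getD_foldl_modify_append]
    rw [PySem.Dict.getD_empty, List.nil_append]
    rw [List.filter_map, List.map_map]
    have : ((fun p : (Int × Int) × (Int × Int × Int × Int) => p.2) ∘ fun t => (k t, t)) = id := rfl
    rw [this, List.map_id]
    rfl
  have hvals : PySem.Dict.values G = (PySem.List.dedup K).map (fun x => T.filter (fun t => k t == x)) := by
    rw [PySem.Dict.values_eq_map_keys G hnodup []]
    rw [hkeys]
    apply List.map_congr_left
    intro x _
    exact hgetD x
  change List.filter _ T = ((PySem.Dict.values G).filter (fun g => g.length == 1)).flatMap (fun g => g)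
  rw [hvals, List.filter_map, List.flatMap_map]
  rw [pv_flatMap_filter (PySem.List.dedup K)
      ((fun g : List (Int × Int × Int × Int) => g.length == 1) ∘ fun x => T.filter (fun t => k t == x))
      (fun a => T.filter (fun t => k t == a))]
  exact (pv_groups_flatten k T.length T (le_refl _)).symm

-- ===== VERDICT (by name: the statement is the Claim_ definition above) =====
theorem combine_except_one_spec : Claim_equal_combine_except_one := by
  intro intervention exclude _
  unfold Spec_combine_except_one
  exact combine_proof intervention exclude
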